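-- pv_equiv track=rewrite | github.com/tommy-hag/hearing-analysis | analysis-pipeline/tests/evaluation/golden_comparison.py | extract_first_position_content
-- ===== SOURCE A (Python) =====
-- def extract_first_position_content(text):
--     """Extract content of first position"""
--     lines = text.split('\n')
--     content_lines = []
--     in_position = False
--     for line in lines:
--         if line.startswith('## ') and not in_position:
--             in_position = True
--             content_lines.append(line)
--         elif in_position:
--             if line.startswith('## '):  # Next position
--                 break
--             content_lines.append(line)
--     return '\n'.join(content_lines)
-- ===== SOURCE B (Python) =====
-- def extract_first_position_content(text):
--     """Extract content of first position"""
--     lines = text.split('\n')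
--     n = len(lines)
--     i = 0
--     while i < n and not lines[i].startswith('## '):
--         i += 1
--     if i == n:
--         return ''
--     j = i + 1
--     while j < n and not lines[j].startswith('## '):
--         j += 1
--     return '\n'.join(lines[i:j])
-- ===== Notes on version B (the rewrite author's own statement) =====
-- stated objective: simpler
-- what changed: Replaces the boolean-flag accumulator loop with two index scans (find the first '## ' line, then the next one) followed by a single slice-and-join.
import Mathlib
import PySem

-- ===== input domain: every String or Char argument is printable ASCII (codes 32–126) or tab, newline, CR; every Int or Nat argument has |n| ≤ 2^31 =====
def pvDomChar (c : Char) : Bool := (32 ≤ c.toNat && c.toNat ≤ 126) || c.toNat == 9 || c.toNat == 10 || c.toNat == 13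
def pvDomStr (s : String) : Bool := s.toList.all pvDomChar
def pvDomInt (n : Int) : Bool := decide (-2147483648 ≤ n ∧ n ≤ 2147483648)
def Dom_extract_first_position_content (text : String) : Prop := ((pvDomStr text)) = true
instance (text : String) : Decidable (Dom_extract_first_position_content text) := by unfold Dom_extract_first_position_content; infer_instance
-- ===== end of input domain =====

-- B replaces A's boolean-flag accumulator loop with two index scans (find the first '## '
-- line, then the next one) and a single slice-and-join; same return value, simpler structure.

-- ===== PORT A =====
-- A's for-loop with a break and the in_position flag, as structural recursion over the lines.
def pvALoop : List String → List String → Bool → List String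
  | [], acc, _ => acc
  | l :: rest, acc, inPos =>
    if PySem.Str.startswith l "## " && !inPos then
      pvALoop rest (acc ++ [l]) true
    else if inPos then
      if PySem.Str.startswith l "## " then acc       -- break
      else pvALoop rest (acc ++ [l]) inPos
    else pvALoop rest acc inPos

def extract_first_position_content (text : String) : String :=
  PySem.Str.join "\n" (pvALoop ((PySem.Str.split? text "\n").getD []) [] false)

-- ===== PORT B =====
-- B's 'while i < n and not lines[i].startswith("## "): i += 1' scan; lines[i] is in range
-- whenever i < n = lines.length, so getD is exact here.
def pvBFind (lines : List String) (n i : Nat) : Nat :=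
  if i < n ∧ ¬ PySem.Str.startswith (lines.getD i "") "## " then
    pvBFind lines n (i + 1)
  else i
termination_by n - i

def extract_first_position_content_alt (text : String) : String :=
  let lines := (PySem.Str.split? text "\n").getD []
  let n := lines.length
  let i := pvBFind lines n 0
  if i = n then ""
  else
    let j := pvBFind lines n (i + 1)
    PySem.Str.join "\n" (PySem.List.slice lines (some (i : Int)) (some (j : Int)))

-- ===== PRECONDITION & SPEC =====
def Spec_extract_first_position_content (text : String) (out : String) : Prop := out = extract_first_position_content_alt text
instance (text : String) (out : String) : Decidable (Spec_extract_first_position_content text out) := by unfold Spec_extract_first_position_content; infer_instance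

-- ===== CLAIM (what is proved, stated in full; the proofs are below) =====
def Claim_equal_extract_first_position_content : Prop := ∀ (text : String), Dom_extract_first_position_content text → Spec_extract_first_position_content text (extract_first_position_content text)

-- ===== LEMMAS AND PROOFS =====

def pvHdr (l : String) : Bool := PySem.Str.startswith l "## "

-- A's loop once in_position: append the lines up to (not including) the next header.
theorem pvALoop_true (rest acc : List String) :
    pvALoop rest acc true = acc ++ rest.takeWhile (fun l => !pvHdr l) := by
  induction rest generalizing acc with
  | nil => simp [pvALoop]
  | cons l rest ih =>
    by_cases h : pvHdr l
    · simp [pvALoop, pvHdr] at h ⊢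
      simp [h]
    · simp [pvALoop, pvHdr] at h ⊢
      simp [h, ih, pvHdr]

-- A's loop before the first header: first header (if any) plus the following non-header lines.
theorem pvALoop_false (lines : List String) :
    pvALoop lines [] false =
      match lines.dropWhile (fun l => !pvHdr l) with
      | [] => []
      | h :: t => h :: t.takeWhile (fun l => !pvHdr l) := by
  induction lines with
  | nil => simp [pvALoop]
  | cons l rest ih =>
    by_cases h : pvHdr l
    · simp [pvALoop, pvHdr] at h ⊢
      simp [h, pvALoop_true, pvHdr]
    · simp [pvALoop, pvHdr] at h ⊢
      simp [h, ih, pvHdr]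

-- B's scan returns i plus the number of consecutive non-header lines from i.
theorem pvBFind_spec (lines : List String) (i : Nat) (hi : i ≤ lines.length) :
    pvBFind lines lines.length i = i + ((lines.drop i).takeWhile (fun l => !pvHdr l)).length := by
  rcases eq_or_lt_of_le hi with h | h
  · rw [pvBFind]
    simp [h, pvHdr]
  · have hget : lines.getD i "" = lines[i] := by
      simp [List.getD_eq_getElem?_getD, List.getElem?_eq_getElem h]
    have hdrop : lines.drop i = lines[i] :: lines.drop (i + 1) := by
      exact List.drop_eq_getElem_cons h
    by_cases hh : pvHdr lines[i]
    · rw [pvBFind, if_neg (by rintro ⟨_, hc⟩; rw [hget] at hc; exact hc hh), hdrop,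
        List.takeWhile_cons]
      simp [hh]
    · have ih := pvBFind_spec lines (i + 1) h
      rw [pvBFind, if_pos ⟨h, by rw [hget]; exact hh⟩, ih, hdrop, List.takeWhile_cons]
      simp [hh]
      omega
termination_by lines.length - i

-- ===== VERDICT (by name: the statement is the Claim_ definition above) =====
theorem extract_first_position_content_spec : Claim_equal_extract_first_position_content := by
  intro text _
  unfold Spec_extract_first_position_content
  unfold extract_first_position_content extract_first_position_content_alt
  set lines := (PySem.Str.split? text "\n").getD [] with hl
  set k := (lines.takeWhile (fun l => !pvHdr l)).length with hk
  have hkle : k ≤ lines.length := by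
    simpa [hk] using (List.takeWhile_prefix (fun l => !pvHdr l) (l := lines)).length_le
  have hi : pvBFind lines lines.length 0 = k := by
    simpa [hk] using pvBFind_spec lines 0 (Nat.zero_le _)
  have hdw : lines.drop k = lines.dropWhile (fun l => !pvHdr l) := by
    conv_lhs => rw [← List.takeWhile_append_dropWhile (p := fun l => !pvHdr l) (l := lines)]
    rw [hk]
    exact List.drop_left
  by_cases hcase : k = lines.length
  · have hnil : lines.dropWhile (fun l => !pvHdr l) = [] := by
      rw [← hdw, hcase, List.drop_length]
    rw [pvALoop_false, hnil]
    simp only [hi, hcase]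
    rfl
  · have hlt : k < lines.length := lt_of_le_of_ne hkle hcase
    have hdropk : lines.drop k = lines[k] :: lines.drop (k + 1) := List.drop_eq_getElem_cons hlt
    set m := ((lines.drop (k + 1)).takeWhile (fun l => !pvHdr l)).length with hm
    have hj : pvBFind lines lines.length (k + 1) = (k + 1) + m := pvBFind_spec lines (k + 1) hlt
    have htake : (lines.drop (k + 1)).take m = (lines.drop (k + 1)).takeWhile (fun l => !pvHdr l) := by
      exact ((List.prefix_iff_eq_take).mp (List.takeWhile_prefix _)).symm
    have hslice : PySem.List.slice lines (some ((k : Int))) (some (((k + 1) + m : Nat) : Int)) =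
        lines[k] :: (lines.drop (k + 1)).takeWhile (fun l => !pvHdr l) := by
      rw [PySem.List.slice_natCast]
      have : (k + 1) + m - k = m + 1 := by omega
      rw [this, hdropk, List.take_succ_cons, htake]
    rw [pvALoop_false, ← hdw, hdropk]
    simp only [hi, hcase, hj]
    simp only [Nat.cast_add, Nat.cast_one] at hslice
    simp [hslice]
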